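-- pv_equiv track=rewrite | github.com/pmeenan/pervasive | pervasive.py | process_headers
-- ===== SOURCE A (Python) =====
-- def process_headers(headers):
--     result = {}
--     for header in headers:
--         name = header['name'].lower()
--         value = header['value']
--         val = '{}, {}'.format(result[name], value) if name in result else value
--         result[name] = val
--     return result
-- ===== SOURCE B (Python) =====
-- def process_headers(headers):
--     groups = {}
--     for header in headers:
--         groups.setdefault(header['name'].lower(), []).append(header['value'])
--     return {name: ', '.join(vals) for name, vals in groups.items()}
-- ===== Notes on version B (the rewrite author's own statement) =====
-- stated objective: alternative
-- what changed: Replaces the fused single-pass running string concatenation with a two-phase grouping: first collect each lowercased name's values into lists (setdefault/append), then a comprehension collapses every group with ', '.join.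
import Mathlib
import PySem

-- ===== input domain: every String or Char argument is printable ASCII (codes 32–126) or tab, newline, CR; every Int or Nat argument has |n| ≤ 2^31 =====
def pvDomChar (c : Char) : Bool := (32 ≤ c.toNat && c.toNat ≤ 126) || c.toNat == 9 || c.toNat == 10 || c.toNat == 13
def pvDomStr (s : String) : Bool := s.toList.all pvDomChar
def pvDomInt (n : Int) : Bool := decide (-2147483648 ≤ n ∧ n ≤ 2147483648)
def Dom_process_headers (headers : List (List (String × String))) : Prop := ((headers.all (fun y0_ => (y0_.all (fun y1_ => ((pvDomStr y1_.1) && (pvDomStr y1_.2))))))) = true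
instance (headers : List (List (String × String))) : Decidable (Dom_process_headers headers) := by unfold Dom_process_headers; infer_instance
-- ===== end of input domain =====

-- B replaces A's fused running-concatenation pass by a grouping pass (name -> list of values) followed by a join pass; same results, alternative decomposition.


-- ===== PORT A =====
-- '{}, {}'.format(a, b) on the String values here is the concatenation a ++ ", " ++ b,
-- ported exactly as PySem.Str.join ", " [a, b]; header['name'] / header['value'] are
-- first-match dict lookups (KeyError excluded by Pre_, default never reached there).
def process_headers (headers : List (List (String × String))) : List (String × String) :=
  (headers.foldl (fun result header =>
      let name := PySem.Str.lower ((PySem.Dict.mk header).getD "name" "")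
      let value := (PySem.Dict.mk header).getD "value" ""
      let val := if result.contains name then PySem.Str.join ", " [result.getD name "", value] else value
      result.insert name val)
    PySem.Dict.empty).items

-- ===== PORT B =====
-- groups.setdefault(k, []).append(v) is modify k [] (· ++ [v]); the final comprehension is the map.
def process_headers_alt (headers : List (List (String × String))) : List (String × String) :=
  (headers.foldl (fun groups header =>
      groups.modify (PySem.Str.lower ((PySem.Dict.mk header).getD "name" ""))
        [] (fun vs => vs ++ [(PySem.Dict.mk header).getD "value" ""]))
    (PySem.Dict.empty : PySem.Dict String (List String))).items.map
    (fun p => (p.1, PySem.Str.join ", " p.2))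

-- ===== PRECONDITION & SPEC =====
-- Pre_ excludes exactly the inputs where Python A raises KeyError: a header dict missing the 'name' or 'value' key.
def Pre_process_headers (headers : List (List (String × String))) : Prop :=
  ∀ header ∈ headers, (PySem.Dict.mk header).contains "name" = true ∧ (PySem.Dict.mk header).contains "value" = true
instance (headers : List (List (String × String))) : Decidable (Pre_process_headers headers) := by unfold Pre_process_headers; infer_instance
def pvWitness_process_headers : (List (List (String × String))) :=
  [[("name", "A"), ("value", "1")], [("name", "a"), ("value", "2")]]

def Spec_process_headers (headers : List (List (String × String))) (out : List (String × String)) : Prop := out = process_headers_alt headers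
instance (headers : List (List (String × String))) (out : List (String × String)) : Decidable (Spec_process_headers headers out) := by unfold Spec_process_headers; infer_instance

-- ===== CLAIM (what is proved, stated in full; the proofs are below) =====
def Claim_equal_process_headers : Prop := ∀ (headers : List (List (String × String))), Dom_process_headers headers → Pre_process_headers headers → Spec_process_headers headers (process_headers headers)

-- ===== LEMMAS AND PROOFS =====

-- ', '.join([v]) = v
lemma join_one (v : String) : PySem.Str.join ", " [v] = v := by
  apply String.toList_inj.mp
  simp [PySem.Str.toList_join, PySem.Chars.join_singleton]

-- splitting off the last element of a nonempty join, list-of-chars level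
lemma chars_join_snoc (sep c : List Char) (cs : List (List Char)) (h : cs ≠ []) :
    PySem.Chars.join sep (cs ++ [c]) = PySem.Chars.join sep cs ++ sep ++ c := by
  induction cs with
  | nil => exact absurd rfl h
  | cons a t ih =>
    cases t with
    | nil => simp [PySem.Chars.join_singleton, PySem.Chars.join_cons_cons]
    | cons b t' =>
      rw [List.cons_append, List.cons_append, PySem.Chars.join_cons_cons,
        ← List.cons_append, ih (by simp), PySem.Chars.join_cons_cons]
      simp [List.append_assoc]

-- splitting off the last element of a nonempty join
lemma join_snoc (vs : List String) (h : vs ≠ []) (v : String) :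
    PySem.Str.join ", " (vs ++ [v]) = PySem.Str.join ", " [PySem.Str.join ", " vs, v] := by
  apply String.toList_inj.mp
  simp only [PySem.Str.toList_join, List.map_append, List.map_cons, List.map_nil]
  rw [chars_join_snoc _ _ _ (by simpa using h), PySem.Chars.join_cons_cons,
    PySem.Chars.join_singleton]

-- the loop invariant: A's dict is B's group dict with every value list joined
lemma loop_inv (hs : List (List (String × String)))
    (d : PySem.Dict String String) (g : PySem.Dict String (List String))
    (h1 : d.items = g.items.map (fun p => (p.1, PySem.Str.join ", " p.2)))
    (h2 : ∀ p ∈ g.items, p.2 ≠ [])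
    (h3 : g.keys.Nodup) :
    (hs.foldl (fun result header =>
      let name := PySem.Str.lower ((PySem.Dict.mk header).getD "name" "")
      let value := (PySem.Dict.mk header).getD "value" ""
      let val := if result.contains name then PySem.Str.join ", " [result.getD name "", value] else value
      result.insert name val) d).items =
    (hs.foldl (fun groups header =>
      groups.modify (PySem.Str.lower ((PySem.Dict.mk header).getD "name" ""))
        [] (fun vs => vs ++ [(PySem.Dict.mk header).getD "value" ""])) g).items.map
      (fun p => (p.1, PySem.Str.join ", " p.2)) := by
  induction hs generalizing d g with
  | nil => simpa using h1
  | cons header rest ih =>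
    simp only [List.foldl_cons]
    set name := PySem.Str.lower ((PySem.Dict.mk header).getD "name" "") with hname
    set value := (PySem.Dict.mk header).getD "value" "" with hvalue
    have hkeys : d.keys = g.keys := by
      simp [PySem.Dict.keys, h1]
    have hcont : d.contains name = g.contains name := by
      by_cases hc : g.contains name = true
      · rw [hc]
        rw [PySem.Dict.contains_iff_mem_keys] at hc ⊢
        rwa [hkeys]
      · have hc' := eq_false_of_ne_true hc
        rw [hc']
        rw [← Bool.not_eq_true] at hc' ⊢
        rw [PySem.Dict.contains_iff_mem_keys] at hc' ⊢
        rwa [hkeys]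
    by_cases hc : g.contains name = true
    · -- duplicate name: A concatenates, B appends to the group
      obtain ⟨vs, hvs⟩ : ∃ vs, g.get? name = some vs := by
        rw [PySem.Dict.contains_eq_isSome_get?] at hc
        exact Option.isSome_iff_exists.mp hc
      have hmem : (name, vs) ∈ g.items := (PySem.Dict.get?_eq_some_iff_mem_items g name vs h3).mp hvs
      have hgetg : g.getD name [] = vs := PySem.Dict.getD_of_mem_items g hmem h3 []
      have hdmem : (name, PySem.Str.join ", " vs) ∈ d.items := by
        rw [h1]; exact List.mem_map.mpr ⟨(name, vs), hmem, rfl⟩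
      have hdnodup : d.keys.Nodup := by rw [hkeys]; exact h3
      have hgetd : d.getD name "" = PySem.Str.join ", " vs :=
        PySem.Dict.getD_of_mem_items d hdmem hdnodup ""
      have hval : PySem.Str.join ", " [d.getD name "", value] = PySem.Str.join ", " (vs ++ [value]) := by
        rw [hgetd, ← join_snoc vs (h2 _ hmem) value]
      simp only [hcont, hc, if_true, PySem.Dict.modify, hgetg]
      apply ih
      · rw [hval, PySem.Dict.items_insert_of_contains d (PySem.Str.join ", " (vs ++ [value])) (by rw [hcont]; exact hc),
          PySem.Dict.items_insert_of_contains g (vs ++ [value]) hc, h1, List.map_map, List.map_map]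
        apply List.map_congr_left
        intro p _
        simp only [Function.comp_apply]
        split_ifs <;> rfl
      · intro p hp
        rw [PySem.Dict.mem_items_insert] at hp
        rcases hp with h | ⟨h, _⟩
        · subst h; simp
        · exact h2 _ h
      · exact PySem.Dict.nodup_keys_insert g name (vs ++ [value]) h3
    · -- fresh name: both append a new entry
      have hc' := eq_false_of_ne_true hc
      have hgetg : g.getD name [] = [] := PySem.Dict.getD_of_not_contains g [] hc'
      simp only [hcont, hc', if_false, Bool.false_eq_true, PySem.Dict.modify, hgetg, List.nil_append]
      apply ih
      · rw [PySem.Dict.items_insert_of_not_contains d value (by rw [hcont]; exact hc'),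
          PySem.Dict.items_insert_of_not_contains g [value] hc', h1, List.map_append]
        simp [join_one]
      · intro p hp
        rw [PySem.Dict.mem_items_insert] at hp
        rcases hp with h | ⟨h, _⟩
        · subst h; simp
        · exact h2 _ h
      · exact PySem.Dict.nodup_keys_insert g name [value] h3

-- ===== VERDICT (by name: the statement is the Claim_ definition above) =====
theorem process_headers_spec : Claim_equal_process_headers := by
  intro headers _ _
  unfold Spec_process_headers process_headers process_headers_alt
  exact loop_inv headers PySem.Dict.empty PySem.Dict.empty (by simp [PySem.Dict.empty])
    (by simp [PySem.Dict.empty]) (by simp [PySem.Dict.keys, PySem.Dict.empty])
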